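-- pv_equiv track=rewrite | github.com/namel3ss-Ai/namel3ss | src/namel3ss/runtime/composition/retrieval_explain_logging.py | _summarize_modality
-- ===== SOURCE A (Python) =====
-- def _summarize_modality(modalities: list[str]) -> str:
--     if not modalities:
--         return "text"
--     unique: list[str] = []
--     for item in modalities:
--         if item not in unique:
--             unique.append(item)
--     if len(unique) == 1:
--         return unique[0]
--     return "mixed"
-- ===== SOURCE B (Python) =====
-- def _summarize_modality(modalities: list[str]) -> str:
--     if not modalities:
--         return "text"
--     first = modalities[0]
--     if all(m == first for m in modalities):
--         return first
--     return "mixed"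
-- ===== Notes on version B (the rewrite author's own statement) =====
-- stated objective: faster
-- what changed: Replaced the quadratic build-a-dedup-list-with-membership-scans loop by a single pass that checks whether every element equals the first; the unique list disappears entirely.
import Mathlib
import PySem

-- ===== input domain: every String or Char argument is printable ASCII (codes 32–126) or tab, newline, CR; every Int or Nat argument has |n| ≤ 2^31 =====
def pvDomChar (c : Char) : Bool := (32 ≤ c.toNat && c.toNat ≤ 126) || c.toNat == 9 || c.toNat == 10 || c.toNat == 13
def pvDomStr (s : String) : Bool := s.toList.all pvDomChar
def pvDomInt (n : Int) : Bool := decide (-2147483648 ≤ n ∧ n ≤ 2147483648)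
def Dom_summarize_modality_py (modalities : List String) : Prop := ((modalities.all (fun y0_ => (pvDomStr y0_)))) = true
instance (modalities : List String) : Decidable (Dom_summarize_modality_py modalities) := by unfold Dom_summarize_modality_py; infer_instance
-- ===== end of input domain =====

-- B replaces A's quadratic dedup-list loop by one linear pass testing "all equal to the first element".

-- ===== PORT A =====
-- the body of A's for-loop: append item if not already present
def summarizeStepA (u : List String) (item : String) : List String :=
  if u.contains item then u else u ++ [item]

def summarize_modality_py (modalities : List String) : String :=
  if modalities = [] then "text"
  else
    let unique : List String := modalities.foldl summarizeStepA []
    if unique.length = 1 then unique.headD "" else "mixed"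

-- ===== PORT B =====
def summarize_modality_py_alt (modalities : List String) : String :=
  match modalities with
  | [] => "text"
  | first :: _ =>
    if modalities.all (fun m => m == first) then first else "mixed"

-- ===== PRECONDITION & SPEC =====
def Spec_summarize_modality_py (modalities : List String) (out : String) : Prop := out = summarize_modality_py_alt modalities
instance (modalities : List String) (out : String) : Decidable (Spec_summarize_modality_py modalities out) := by unfold Spec_summarize_modality_py; infer_instance

-- ===== CLAIM (what is proved, stated in full; the proofs are below) =====
def Claim_equal_summarize_modality_py : Prop := ∀ (modalities : List String), Dom_summarize_modality_py modalities → Spec_summarize_modality_py modalities (summarize_modality_py modalities)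

-- ===== LEMMAS AND PROOFS =====

theorem mem_foldl_stepA_acc (xs : List String) (acc : List String) (a : String)
    (h : a ∈ acc) : a ∈ xs.foldl summarizeStepA acc := by
  induction xs generalizing acc with
  | nil => simpa using h
  | cons x xs ih =>
    simp only [List.foldl_cons]
    apply ih
    unfold summarizeStepA
    split
    · exact h
    · exact List.mem_append_left _ h

theorem mem_foldl_stepA_elem (xs : List String) (acc : List String) (a : String)
    (h : a ∈ xs) : a ∈ xs.foldl summarizeStepA acc := by
  induction xs generalizing acc with
  | nil => simp at h
  | cons x xs ih =>
    simp only [List.foldl_cons]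
    rcases List.mem_cons.mp h with rfl | h'
    · apply mem_foldl_stepA_acc
      unfold summarizeStepA
      split
      · exact List.mem_of_elem_eq_true (by assumption)
      · simp
    · exact ih _ h'

theorem foldl_stepA_all_eq (x : String) (xs : List String)
    (h : ∀ a ∈ xs, a = x) : xs.foldl summarizeStepA [x] = [x] := by
  induction xs with
  | nil => rfl
  | cons y ys ih =>
    have hy : y = x := h y (by simp)
    subst hy
    simp only [List.foldl_cons]
    have : summarizeStepA [y] y = [y] := by simp [summarizeStepA]
    rw [this]
    exact ih (fun a ha => h a (by simp [ha]))

-- ===== VERDICT (by name: the statement is the Claim_ definition above) =====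
theorem summarize_modality_py_spec : Claim_equal_summarize_modality_py := by
  intro modalities _
  unfold Spec_summarize_modality_py summarize_modality_py summarize_modality_py_alt
  match modalities with
  | [] => rfl
  | x :: xs =>
    simp only [List.foldl_cons]
    have hfirst : summarizeStepA [] x = [x] := by simp [summarizeStepA]
    rw [hfirst]
    by_cases hall : ∀ a ∈ xs, a = x
    · rw [foldl_stepA_all_eq x xs hall]
      have : (x :: xs).all (fun m => m == x) = true := by
        rw [List.all_eq_true]
        intro a ha
        rcases List.mem_cons.mp ha with rfl | h
        · simp
        · simp [hall a h]
      simp [this]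
    · rw [not_forall] at hall
      simp only [not_forall, exists_prop] at hall
      obtain ⟨y, hy, hyx⟩ := hall
      have hxmem : x ∈ xs.foldl summarizeStepA [x] := mem_foldl_stepA_acc _ _ _ (by simp)
      have hymem : y ∈ xs.foldl summarizeStepA [x] := mem_foldl_stepA_elem _ _ _ hy
      have hlen : (xs.foldl summarizeStepA [x]).length ≠ 1 := by
        intro h1
        obtain ⟨z, hz⟩ := List.length_eq_one_iff.mp h1
        rw [hz] at hxmem hymem
        simp at hxmem hymem
        exact hyx (hymem.trans hxmem.symm)
      have hnall : (x :: xs).all (fun m => m == x) = false := by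
        simp only [List.all_cons, Bool.and_eq_false_iff]
        right
        simp only [List.all_eq_false]
        exact ⟨y, hy, by simp [hyx]⟩
      simp [hlen, hnall]
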